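-- pv_equiv track=rewrite | github.com/JinnZ2/hgai-geometric-systems | audit.py | audit_precision
-- ===== SOURCE A (Python) =====
-- from typing import Any, Dict, List, Optional
--
-- def audit_precision(numbers: List[Dict], text: str) -> str:
--     """Judge whether the numerical precision is appropriate."""
--     if not numbers:
--         return "No numerical claims found. Qualitative-only forecast."
--
--     ranges = sum(1 for n in numbers if n["type"] == "range")
--     approx = sum(1 for n in numbers if n["type"] == "approximate")
--     point = sum(1 for n in numbers if n["type"] not in ("range", "approximate"))
--
--     if ranges > point:
--         return "Good: mostly ranges/intervals. Acknowledges uncertainty."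
--     elif approx > 0:
--         return "Mixed: some approximations used. Moderate precision claims."
--     else:
--         return "Warning: point estimates dominate. May overstate precision."
-- ===== SOURCE B (Python) =====
-- from typing import Any, Dict, List, Optional
--
-- def audit_precision(numbers: List[Dict], text: str) -> str:
--     """Judge whether the numerical precision is appropriate.
--
--     Arithmetic reformulation: a single weighted score (range=2, approximate=1,
--     point=0). Since len(numbers) = ranges + approx + point, the original test
--     ranges > point is equivalent to score = 2*ranges + approx > len(numbers).
--     No per-category counters are kept.
--     """
--     if not numbers:
--         return "No numerical claims found. Qualitative-only forecast."
--
--     score = 0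
--     has_approx = False
--     for n in numbers:
--         t = n["type"]
--         if t == "range":
--             score += 2
--         elif t == "approximate":
--             score += 1
--             has_approx = True
--
--     if score > len(numbers):
--         return "Good: mostly ranges/intervals. Acknowledges uncertainty."
--     elif has_approx:
--         return "Mixed: some approximations used. Moderate precision claims."
--     else:
--         return "Warning: point estimates dominate. May overstate precision."
-- ===== Notes on version B (the rewrite author's own statement) =====
-- stated objective: alternative
-- what changed: Replaces the three per-category counts and the count comparison with a single weighted score (2 per range, 1 per approximate) and a has-approx flag, using the identity 2*ranges+approx > len(numbers) <=> ranges > point; no point/range/approx counters exist in B.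
import Mathlib
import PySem

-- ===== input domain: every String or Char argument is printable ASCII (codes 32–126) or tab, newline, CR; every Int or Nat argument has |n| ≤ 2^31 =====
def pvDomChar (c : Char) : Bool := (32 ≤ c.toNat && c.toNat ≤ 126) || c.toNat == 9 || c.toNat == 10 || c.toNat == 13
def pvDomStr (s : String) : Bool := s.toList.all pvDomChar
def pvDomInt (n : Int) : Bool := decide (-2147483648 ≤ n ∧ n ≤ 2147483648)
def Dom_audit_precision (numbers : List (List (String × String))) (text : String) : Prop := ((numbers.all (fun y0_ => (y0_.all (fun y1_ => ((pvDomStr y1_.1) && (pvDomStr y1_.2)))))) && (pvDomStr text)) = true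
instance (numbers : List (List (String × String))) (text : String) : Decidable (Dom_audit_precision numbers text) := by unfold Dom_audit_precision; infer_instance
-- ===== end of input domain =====

-- B replaces A's three category counts with a single weighted score (range=2,
-- approximate=1) plus a has-approx flag, using 2r+a > len ⇔ r > p (alternative formulation).


-- ===== PORT A =====
-- n["type"] on an association-list dict: first matching key (Python raises KeyError
-- when absent; such inputs are excluded by Pre_ below).
def lookupType (n : List (String × String)) : Option String :=
  (n.find? (fun p => p.1 == "type")).map (·.2)

def audit_precision (numbers : List (List (String × String))) (text : String) : String :=
  if numbers = [] then "No numerical claims found. Qualitative-only forecast."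
  else
    let ranges := numbers.countP (fun n => lookupType n == some "range")
    let approx := numbers.countP (fun n => lookupType n == some "approximate")
    let point := numbers.countP (fun n =>
      !(lookupType n == some "range") && !(lookupType n == some "approximate"))
    if point < ranges then "Good: mostly ranges/intervals. Acknowledges uncertainty."
    else if 0 < approx then "Mixed: some approximations used. Moderate precision claims."
    else "Warning: point estimates dominate. May overstate precision."

-- ===== PORT B =====
-- one weighted score and a has-approx flag
def auditStep (acc : Nat × Bool) (n : List (String × String)) : Nat × Bool :=
  let t := lookupType n
  if t == some "range" then (acc.1 + 2, acc.2)
  else if t == some "approximate" then (acc.1 + 1, true)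
  else acc

def audit_precision_alt (numbers : List (List (String × String))) (text : String) : String :=
  if numbers = [] then "No numerical claims found. Qualitative-only forecast."
  else
    let c := numbers.foldl auditStep (0, false)
    if numbers.length < c.1 then "Good: mostly ranges/intervals. Acknowledges uncertainty."
    else if c.2 then "Mixed: some approximations used. Moderate precision claims."
    else "Warning: point estimates dominate. May overstate precision."

-- ===== PRECONDITION & SPEC =====
-- Pre_ excludes inputs where some dict lacks the key "type": Python A raises KeyError there.
def Pre_audit_precision (numbers : List (List (String × String))) (text : String) : Prop :=
  ∀ n ∈ numbers, ∃ p ∈ n, p.1 = "type"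
instance (numbers : List (List (String × String))) (text : String) : Decidable (Pre_audit_precision numbers text) := by unfold Pre_audit_precision; infer_instance
def pvWitness_audit_precision : (List (List (String × String))) × String := ([[("type", "range")]], "")

def Spec_audit_precision (numbers : List (List (String × String))) (text : String) (out : String) : Prop := out = audit_precision_alt numbers text
instance (numbers : List (List (String × String))) (text : String) (out : String) : Decidable (Spec_audit_precision numbers text out) := by unfold Spec_audit_precision; infer_instance

-- ===== CLAIM (what is proved, stated in full; the proofs are below) =====
def Claim_equal_audit_precision : Prop := ∀ (numbers : List (List (String × String))) (text : String), Dom_audit_precision numbers text → Pre_audit_precision numbers text → Spec_audit_precision numbers text (audit_precision numbers text)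

-- ===== LEMMAS AND PROOFS =====
lemma auditFold_eq (numbers : List (List (String × String))) (s : Nat) (b : Bool) :
    numbers.foldl auditStep (s, b) =
      (s + 2 * numbers.countP (fun n => lookupType n == some "range")
         + numbers.countP (fun n => lookupType n == some "approximate"),
       b || decide (0 < numbers.countP (fun n => lookupType n == some "approximate"))) := by
  induction numbers generalizing s b with
  | nil => simp
  | cons x xs ih =>
    simp only [List.foldl_cons, List.countP_cons, auditStep]
    by_cases h1 : lookupType x == some "range"
    · have h2 : ¬ (lookupType x == some "approximate") := by
        simp only [beq_iff_eq] at h1 ⊢; simp [h1]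
      simp [h1, h2, ih]
      omega
    · by_cases h2 : lookupType x == some "approximate"
      · simp [h1, h2, ih]
        omega
      · simp [h1, h2, ih]

lemma count_partition (numbers : List (List (String × String))) :
    numbers.countP (fun n => lookupType n == some "range")
      + numbers.countP (fun n => lookupType n == some "approximate")
      + numbers.countP (fun n =>
          !(lookupType n == some "range") && !(lookupType n == some "approximate"))
      = numbers.length := by
  induction numbers with
  | nil => simp
  | cons x xs ih =>
    simp only [List.countP_cons, List.length_cons]
    by_cases h1 : lookupType x == some "range"
    · have h2 : ¬ (lookupType x == some "approximate") := by
        simp only [beq_iff_eq] at h1 ⊢; simp [h1]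
      simp [h1, h2]; omega
    · by_cases h2 : lookupType x == some "approximate"
      · simp [h1, h2]; omega
      · simp [h1, h2]; omega

-- ===== VERDICT (by name: the statement is the Claim_ definition above) =====
theorem audit_precision_spec : Claim_equal_audit_precision := by
  intro numbers text _ _
  unfold Spec_audit_precision audit_precision audit_precision_alt
  by_cases h : numbers = []
  · simp [h]
  · have hpart := count_partition numbers
    simp only [h, if_false, auditFold_eq, Nat.zero_add, Bool.false_or]
    set R := numbers.countP (fun n => lookupType n == some "range") with hR
    set A := numbers.countP (fun n => lookupType n == some "approximate") with hA
    set P := numbers.countP (fun n =>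
      !(lookupType n == some "range") && !(lookupType n == some "approximate")) with hP
    have hgood : P < R ↔ numbers.length < 2 * R + A := by omega
    by_cases hg : P < R
    · simp [hg, hgood.mp hg]
    · have hg2 : ¬ numbers.length < 2 * R + A := fun hx => hg (hgood.mpr hx)
      simp [hg, hg2]
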